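-- pv_equiv track=rewrite | github.com/JamesAC42/Rodnam | school/compsciprinc/encrypttwo.py | complicate
-- ===== SOURCE A (Python) =====
-- alphabet = 'abcdefghijklmnopqrstuvwxyz'
--
-- def complicate(pw):
-- 	pw = pw.lower()
-- 	numbers = [str(x) for x in range(10)]
-- 	new = []
-- 	for character in pw:
-- 		if character in numbers:
-- 			new.append(alphabet[int(character) - 1])
-- 			new.append(character)
-- 		else:
-- 			new.append(character)
-- 	return("".join(new))
-- ===== SOURCE B (Python) =====
-- alphabet = 'abcdefghijklmnopqrstuvwxyz'
--
-- def complicate(pw):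
--     # staged rewriting: one whole-string replace pass per digit, instead of a
--     # per-character loop; safe because each pass only inserts letters, which
--     # no later pass touches.
--     pw = pw.lower()
--     for d in range(10):
--         pw = pw.replace(str(d), alphabet[d - 1] + str(d))
--     return pw
-- ===== Notes on version B (the rewrite author's own statement) =====
-- stated objective: faster
-- what changed: Replaces the per-character loop with a membership test by ten staged whole-string str.replace passes, one per digit, each substituting the digit by letter+digit; correct because a pass only inserts letters, which no later digit pass touches.
import Mathlib
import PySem

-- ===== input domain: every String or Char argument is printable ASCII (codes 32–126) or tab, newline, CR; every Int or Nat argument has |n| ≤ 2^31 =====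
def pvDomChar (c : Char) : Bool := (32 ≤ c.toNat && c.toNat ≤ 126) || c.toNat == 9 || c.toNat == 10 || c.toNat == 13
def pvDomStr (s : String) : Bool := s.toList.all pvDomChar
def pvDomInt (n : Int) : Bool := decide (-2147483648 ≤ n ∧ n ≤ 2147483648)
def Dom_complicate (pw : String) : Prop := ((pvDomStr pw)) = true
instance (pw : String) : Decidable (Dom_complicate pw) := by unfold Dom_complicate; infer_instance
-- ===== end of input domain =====

-- B replaces A's per-character loop by ten staged whole-string replace passes (one per digit); same O(n) asymptotics, measured faster by a constant factor (C-level replace).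

def pvAlphabet : String := "abcdefghijklmnopqrstuvwxyz"

-- ===== PORT A =====
def complicate (pw : String) : String :=
  let pwl := PySem.Str.lower pw
  let numbers : List String := (PySem.List.pyRange 0 10 1).map PySem.Int.toStr
  let new : List Char := pwl.toList.foldl (fun acc c =>
    if numbers.contains (String.ofList [c]) then
      acc ++ [(PySem.Str.pyGet? pvAlphabet ((PySem.Int.ofStr? (String.ofList [c])).getD 0 - 1)).getD ' ', c]
    else acc ++ [c]) []
  String.ofList new

-- ===== PORT B =====
def complicate_alt (pw : String) : String :=
  String.ofList ((PySem.List.pyRange 0 10 1).foldl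
    (fun s d => PySem.Chars.replace s (PySem.Int.toStr d).toList
        ((PySem.Str.pyGet? pvAlphabet (d - 1)).getD ' ' :: (PySem.Int.toStr d).toList))
    (PySem.Str.lower pw).toList)

-- ===== PRECONDITION & SPEC =====
def Spec_complicate (pw : String) (out : String) : Prop := out = complicate_alt pw
instance (pw : String) (out : String) : Decidable (Spec_complicate pw out) := by unfold Spec_complicate; infer_instance

-- ===== CLAIM =====
def Claim_equal_complicate : Prop := ∀ (pw : String), Dom_complicate pw → Spec_complicate pw (complicate pw)

-- ===== LEMMAS AND PROOFS =====

/-- one substitution pass: every occurrence of the character `d` becomes `w` -/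
def pvSubst (d : Char) (w : List Char) (L : List Char) : List Char :=
  L.flatMap fun c => if c = d then w else [c]

/-- the ten passes of B, with the concrete digit/replacement characters -/
def pvPasses (L : List Char) : List Char :=
  pvSubst '9' ['i','9'] (pvSubst '8' ['h','8'] (pvSubst '7' ['g','7'] (pvSubst '6' ['f','6']
    (pvSubst '5' ['e','5'] (pvSubst '4' ['d','4'] (pvSubst '3' ['c','3'] (pvSubst '2' ['b','2']
    (pvSubst '1' ['a','1'] (pvSubst '0' ['z','0'] L)))))))))

/-- A's per-character step -/
def pvStepA (c : Char) : List Char :=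
  if (["0","1","2","3","4","5","6","7","8","9"] : List String).contains (String.ofList [c]) then
    [(PySem.Str.pyGet? pvAlphabet ((PySem.Int.ofStr? (String.ofList [c])).getD 0 - 1)).getD ' ', c]
  else [c]

theorem pvReplaceGo (d : Char) (w : List Char) :
    ∀ (s : List Char) (fuel : Nat) (acc : List Char), s.length ≤ fuel →
      PySem.Chars.replace.go [d] w fuel s acc = acc.reverse ++ pvSubst d w s := by
  intro s
  induction s with
  | nil =>
      intro fuel acc _
      cases fuel <;> simp [PySem.Chars.replace.go, pvSubst]
  | cons c t ih =>
      intro fuel acc hf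
      cases fuel with
      | zero => simp at hf
      | succ m =>
          by_cases hc : c = d
          · subst hc
            simp only [PySem.Chars.replace.go, List.isPrefixOf, BEq.rfl, Bool.and_true,
              if_true, List.length_cons, List.length_nil, List.drop_succ_cons,
              List.drop_zero]
            rw [ih m (w.reverse ++ acc) (by simpa using hf)]
            simp [pvSubst]
          · have hbe : (d == c) = false := by
              simp [beq_eq_false_iff_ne]; exact fun h => hc h.symm
            simp only [PySem.Chars.replace.go, List.isPrefixOf, hbe, Bool.false_and, if_neg,
              Bool.false_eq_true, not_false_eq_true]
            rw [ih m (c :: acc) (by simpa using Nat.le_of_succ_le_succ hf)]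
            simp [pvSubst, hc]

theorem pvReplaceSingle (d : Char) (w s : List Char) :
    PySem.Chars.replace s [d] w = pvSubst d w s := by
  rw [PySem.Chars.replace]
  simp [pvReplaceGo d w s s.length [] le_rfl]

theorem pvPassEq (d : Int) (dc lc : Char)
    (h1 : (PySem.Int.toStr d).toList = [dc])
    (h2 : (PySem.Str.pyGet? pvAlphabet (d - 1)).getD ' ' = lc) (s : List Char) :
    PySem.Chars.replace s (PySem.Int.toStr d).toList
      ((PySem.Str.pyGet? pvAlphabet (d - 1)).getD ' ' :: (PySem.Int.toStr d).toList)
      = pvSubst dc [lc, dc] s := by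
  rw [h1, h2]; exact pvReplaceSingle dc [lc, dc] s

theorem pvSubst_append (d : Char) (w L1 L2 : List Char) :
    pvSubst d w (L1 ++ L2) = pvSubst d w L1 ++ pvSubst d w L2 := by
  simp [pvSubst]

theorem pvPasses_append (L1 L2 : List Char) :
    pvPasses (L1 ++ L2) = pvPasses L1 ++ pvPasses L2 := by
  simp [pvPasses, pvSubst_append]

theorem pvCharStep (c : Char) : pvPasses [c] = pvStepA c := by
  by_cases h : c ∈ (['0','1','2','3','4','5','6','7','8','9'] : List Char)
  · fin_cases h <;> decide
  · simp only [List.mem_cons, List.not_mem_nil, or_false, not_or] at h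
    obtain ⟨h0, h1, h2, h3, h4, h5, h6, h7, h8, h9⟩ := h
    have hcontains :
        ((["0","1","2","3","4","5","6","7","8","9"] : List String).contains
          (String.ofList [c])) = false := by
      simp only [List.contains_eq_mem, decide_eq_false_iff_not, List.mem_cons,
        List.not_mem_nil, or_false, not_or]
      refine ⟨?_, ?_, ?_, ?_, ?_, ?_, ?_, ?_, ?_, ?_⟩ <;>
        · intro he
          first
          | exact h0 (by have := congrArg String.toList he; simpa using this)
          | exact h1 (by have := congrArg String.toList he; simpa using this)
          | exact h2 (by have := congrArg String.toList he; simpa using this)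
          | exact h3 (by have := congrArg String.toList he; simpa using this)
          | exact h4 (by have := congrArg String.toList he; simpa using this)
          | exact h5 (by have := congrArg String.toList he; simpa using this)
          | exact h6 (by have := congrArg String.toList he; simpa using this)
          | exact h7 (by have := congrArg String.toList he; simpa using this)
          | exact h8 (by have := congrArg String.toList he; simpa using this)
          | exact h9 (by have := congrArg String.toList he; simpa using this)
    rw [pvStepA, if_neg (by rw [hcontains]; exact Bool.false_ne_true)]
    simp [pvPasses, pvSubst, h0, h1, h2, h3, h4, h5, h6, h7, h8, h9]

theorem pvPasses_flatMap (L : List Char) : pvPasses L = L.flatMap pvStepA := by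
  induction L with
  | nil => simp [pvPasses, pvSubst]
  | cons c t ih =>
      have : (c :: t) = [c] ++ t := rfl
      rw [this, pvPasses_append, pvCharStep, ih, List.flatMap_append]
      simp

-- ===== VERDICT =====
theorem complicate_spec : Claim_equal_complicate := by
  unfold Claim_equal_complicate Spec_complicate
  intro pw _
  have hnum : (PySem.List.pyRange 0 10 1).map PySem.Int.toStr
      = (["0","1","2","3","4","5","6","7","8","9"] : List String) := by decide
  have hfun : (fun (acc : List Char) c =>
      if (["0","1","2","3","4","5","6","7","8","9"] : List String).contains (String.ofList [c]) then
        acc ++ [(PySem.Str.pyGet? pvAlphabet ((PySem.Int.ofStr? (String.ofList [c])).getD 0 - 1)).getD ' ', c]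
      else acc ++ [c]) = fun acc c => acc ++ pvStepA c := by
    funext acc c
    rw [pvStepA]
    split <;> rfl
  have hA : complicate pw
      = String.ofList ((PySem.Str.lower pw).toList.flatMap pvStepA) := by
    rw [complicate]
    simp only [hnum, hfun, PySem.List.foldl_append_eq_flatMap, List.nil_append]
  have hrange : PySem.List.pyRange 0 10 1 = ([0,1,2,3,4,5,6,7,8,9] : List Int) := by decide
  have hB : complicate_alt pw
      = String.ofList (pvPasses (PySem.Str.lower pw).toList) := by
    rw [complicate_alt, hrange]
    simp only [List.foldl_cons, List.foldl_nil]
    rw [pvPassEq 0 '0' 'z' (by decide) (by decide),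
        pvPassEq 1 '1' 'a' (by decide) (by decide),
        pvPassEq 2 '2' 'b' (by decide) (by decide),
        pvPassEq 3 '3' 'c' (by decide) (by decide),
        pvPassEq 4 '4' 'd' (by decide) (by decide),
        pvPassEq 5 '5' 'e' (by decide) (by decide),
        pvPassEq 6 '6' 'f' (by decide) (by decide),
        pvPassEq 7 '7' 'g' (by decide) (by decide),
        pvPassEq 8 '8' 'h' (by decide) (by decide),
        pvPassEq 9 '9' 'i' (by decide) (by decide)]
    rfl
  rw [hA, hB, pvPasses_flatMap]
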